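-- pv_equiv track=rewrite | github.com/stitionai/devika | src/agents/smart_researcher.py | filter_queries
-- ===== SOURCE A (Python) =====
-- from typing import List, Dict, Any
--
-- def filter_queries(queries: List[str], context: Dict[str, Any]) -> List[str]:
--     """Filter and prioritize search queries based on context"""
--     if not queries:
--         return []
--
--     # Remove duplicates while preserving order
--     unique_queries = []
--     seen = set()
--     for query in queries:
--         if query.lower() not in seen:
--             unique_queries.append(query)
--             seen.add(query.lower())
--
--     # Prioritize based on technical context
--     technical_context = context.get("technical_context", {})
--     languages = technical_context.get("programming_languages", [])
--     frameworks = technical_context.get("frameworks", [])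
--
--     prioritized = []
--     regular = []
--
--     for query in unique_queries:
--         query_lower = query.lower()
--         is_priority = False
--
--         # Prioritize queries related to detected technologies
--         for lang in languages:
--             if lang in query_lower:
--                 is_priority = True
--                 break
--
--         if not is_priority:
--             for framework in frameworks:
--                 if framework in query_lower:
--                     is_priority = True
--                     break
--
--         if is_priority:
--             prioritized.append(query)
--         else:
--             regular.append(query)
--
--     # Return prioritized queries first, then regular ones
--     return (prioritized + regular)[:5]  # Limit to 5 queries max
-- ===== SOURCE B (Python) =====
-- def filter_queries(queries, context):
--     """Filter and prioritize search queries based on context."""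
--     unique_queries = []
--     seen = set()
--     for query in queries:
--         low = query.lower()
--         if low not in seen:
--             seen.add(low)
--             unique_queries.append(query)
--
--     technical_context = context.get("technical_context", {})
--     techs = (technical_context.get("programming_languages", [])
--              + technical_context.get("frameworks", []))
--
--     # Stable sort: queries mentioning a detected technology (key False) come
--     # first, original relative order is preserved within each group.
--     ranked = sorted(unique_queries,
--                     key=lambda q: not any(tech in q.lower() for tech in techs))
--     return ranked[:5]
-- ===== Notes on version B (the rewrite author's own statement) =====
-- stated objective: simpler
-- what changed: replaces A's explicit two-list partition (prioritized/regular accumulators filled by a loop with nested break-loops over languages then frameworks) by one stable sort of the deduped list on a boolean priority key over languages+frameworks, then a slice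
import Mathlib
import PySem

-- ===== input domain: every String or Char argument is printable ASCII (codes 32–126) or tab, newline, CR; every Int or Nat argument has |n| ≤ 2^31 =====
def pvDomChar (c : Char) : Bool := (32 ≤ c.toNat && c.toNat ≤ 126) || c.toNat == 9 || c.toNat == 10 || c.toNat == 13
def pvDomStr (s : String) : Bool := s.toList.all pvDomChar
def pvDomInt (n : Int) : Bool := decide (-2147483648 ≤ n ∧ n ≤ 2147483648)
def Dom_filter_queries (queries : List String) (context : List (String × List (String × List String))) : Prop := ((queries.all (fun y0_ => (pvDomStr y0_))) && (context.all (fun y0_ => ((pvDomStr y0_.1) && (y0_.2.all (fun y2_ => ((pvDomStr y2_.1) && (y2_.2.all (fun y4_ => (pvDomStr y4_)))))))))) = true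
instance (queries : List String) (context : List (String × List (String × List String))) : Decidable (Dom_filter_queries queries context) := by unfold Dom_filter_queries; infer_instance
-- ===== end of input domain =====

-- B replaces A's two-list partition by one stable sort on a boolean priority key: simpler decomposition, same cost class.
-- Both Pythons share the identical case-insensitive order-preserving dedup loop; it is the helper pvDedupLower here.
def pvDedupLower (queries : List String) : List String :=
  (queries.foldl
    (fun (st : List String × PySem.Set String) query =>
      if PySem.Str.lower query ∈ st.2 then st
      else (st.1 ++ [query], st.2.add (PySem.Str.lower query)))
    ([], PySem.Set.empty)).1

-- ===== PORT A =====
def filter_queries (queries : List String) (context : List (String × List (String × List String))) : List String :=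
  if queries = [] then []
  else
    let unique_queries := pvDedupLower queries
    let technical_context := (PySem.Dict.mk context).getD "technical_context" []
    let languages := (PySem.Dict.mk technical_context).getD "programming_languages" []
    let frameworks := (PySem.Dict.mk technical_context).getD "frameworks" []
    let pr := unique_queries.foldl
      (fun (st : List String × List String) query =>
        let query_lower := PySem.Str.lower query
        -- the two Python for-loops with break are each an existential scan: List.any
        let is_priority :=
          if languages.any (fun lang => PySem.Str.isIn lang query_lower) then true
          else frameworks.any (fun framework => PySem.Str.isIn framework query_lower)
        if is_priority then (st.1 ++ [query], st.2) else (st.1, st.2 ++ [query]))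
      ([], [])
    PySem.List.slice (pr.1 ++ pr.2) none (some 5)

-- ===== PORT B =====
def filter_queries_alt (queries : List String) (context : List (String × List (String × List String))) : List String :=
  let unique_queries := pvDedupLower queries
  let technical_context := (PySem.Dict.mk context).getD "technical_context" []
  let techs := (PySem.Dict.mk technical_context).getD "programming_languages" []
    ++ (PySem.Dict.mk technical_context).getD "frameworks" []
  let ranked := PySem.List.sorted unique_queries
    (fun q => !(techs.any (fun tech => PySem.Str.isIn tech (PySem.Str.lower q)))) false
  PySem.List.slice ranked none (some 5)

-- ===== PRECONDITION & SPEC =====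
def Spec_filter_queries (queries : List String) (context : List (String × List (String × List String))) (out : List String) : Prop := out = filter_queries_alt queries context
instance (queries : List String) (context : List (String × List (String × List String))) (out : List String) : Decidable (Spec_filter_queries queries context out) := by unfold Spec_filter_queries; infer_instance

-- ===== CLAIM (what is proved, stated in full; the proofs are below) =====
def Claim_equal_filter_queries : Prop := ∀ (queries : List String) (context : List (String × List (String × List String))), Dom_filter_queries queries context → Spec_filter_queries queries context (filter_queries queries context)

-- ===== LEMMAS AND PROOFS =====

-- insertBy walks past a prefix it does not insert before
theorem insertBy_append_left {α : Type} (before : α → α → Bool) (x : α) (F T : List α)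
    (h : ∀ y ∈ F, before x y = false) :
    PySem.List.insertBy before x (F ++ T) = F ++ PySem.List.insertBy before x T := by
  induction F with
  | nil => rfl
  | cons f fs ih =>
      have hf : before x f = false := h f (by simp)
      simp [PySem.List.insertBy, hf, ih (fun y hy => h y (by simp [hy]))]

-- insertBy puts x in front when it goes before every element
theorem insertBy_cons_of_forall_before {α : Type} (before : α → α → Bool) (x : α) (T : List α)
    (h : ∀ y ∈ T, before x y = true) :
    PySem.List.insertBy before x T = x :: T := by
  cases T with
  | nil => rfl
  | cons t ts => simp [PySem.List.insertBy, h t (by simp)]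

-- the insertion-sort fold on a boolean key keeps a partition invariant
theorem foldl_insertBy_bool_partition {α : Type} (pri : α → Bool) (xs : List α) :
    ∀ (F T : List α), (∀ y ∈ F, pri y = true) → (∀ y ∈ T, pri y = false) →
    xs.foldl (fun acc x => PySem.List.insertBy (fun a b => decide ((!pri a) < (!pri b))) x acc) (F ++ T)
      = (F ++ xs.filter pri) ++ (T ++ xs.filter (fun x => !pri x)) := by
  induction xs with
  | nil => intro F T _ _; simp
  | cons x xs ih =>
      intro F T hF hT
      by_cases hx : pri x = true
      · have hstep : PySem.List.insertBy (fun a b => decide ((!pri a) < (!pri b))) x (F ++ T)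
            = (F ++ [x]) ++ T := by
          rw [insertBy_append_left _ _ _ _ (fun y hy => by simp [hx, hF y hy]),
              insertBy_cons_of_forall_before _ _ _ (fun y hy => by simp [hx, hT y hy])]
          simp
        have hF' : ∀ y ∈ F ++ [x], pri y = true := by
          intro y hy
          rcases List.mem_append.1 hy with h | h
          · exact hF y h
          · simp at h; simpa [h] using hx
        rw [List.foldl_cons, hstep, ih (F ++ [x]) T hF' hT]
        simp [hx]
      · have hx' : pri x = false := by simpa using hx
        have hstep : PySem.List.insertBy (fun a b => decide ((!pri a) < (!pri b))) x (F ++ T)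
            = F ++ (T ++ [x]) := by
          rw [PySem.List.insertBy_of_forall_not_before _ _ _ (fun y hy => by simp [hx'])]
          simp
        have hT' : ∀ y ∈ T ++ [x], pri y = false := by
          intro y hy
          rcases List.mem_append.1 hy with h | h
          · exact hT y h
          · simp at h; simpa [h] using hx'
        rw [List.foldl_cons, hstep, ih F (T ++ [x]) hF hT']
        simp [hx']

-- Python's stable sort on the key (not pri q) is exactly "priority first, then regular"
theorem sorted_bool_partition {α : Type} (pri : α → Bool) (xs : List α) :
    PySem.List.sorted xs (fun x => !pri x) false
      = xs.filter pri ++ xs.filter (fun x => !pri x) := by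
  rw [PySem.List.sorted_eq_foldl_insertBy]
  simpa using foldl_insertBy_bool_partition pri xs [] [] (by simp) (by simp)

-- A's two-accumulator loop is the pair of filters
theorem foldl_partition_pair (pri : String → Bool) (l : List String) :
    ∀ (p r : List String),
    l.foldl (fun (st : List String × List String) q =>
        if pri q then (st.1 ++ [q], st.2) else (st.1, st.2 ++ [q])) (p, r)
      = (p ++ l.filter pri, r ++ l.filter (fun q => !pri q)) := by
  induction l with
  | nil => intro p r; simp
  | cons x xs ih =>
      intro p r
      by_cases hx : pri x = true
      · rw [List.foldl_cons, if_pos hx, ih]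
        simp [hx]
      · have hx' : pri x = false := by simpa using hx
        rw [List.foldl_cons, if_neg (by simp [hx']), ih]
        simp [hx']

-- ===== VERDICT (by name: the statement is the Claim_ definition above) =====
theorem filter_queries_spec : Claim_equal_filter_queries := by
  intro queries context _
  unfold Spec_filter_queries filter_queries filter_queries_alt
  by_cases hq : queries = []
  · subst hq; simp [pvDedupLower, PySem.List.slice]
  · simp only [hq, if_false]
    set tc := (PySem.Dict.mk context).getD "technical_context" [] with htc
    set langs := (PySem.Dict.mk tc).getD "programming_languages" [] with hl
    set fws := (PySem.Dict.mk tc).getD "frameworks" [] with hf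
    set pri : String → Bool :=
      fun q => (langs ++ fws).any (fun tech => PySem.Str.isIn tech (PySem.Str.lower q)) with hpri
    have hkey : ∀ q : String,
        (if langs.any (fun lang => PySem.Str.isIn lang (PySem.Str.lower q)) then true
         else fws.any (fun framework => PySem.Str.isIn framework (PySem.Str.lower q))) = pri q := by
      intro q
      cases h : langs.any (fun lang => PySem.Str.isIn lang (PySem.Str.lower q)) with
      | true =>
          rw [if_pos rfl]
          simp only [hpri]
          rw [List.any_append, h, Bool.true_or]
      | false =>
          rw [if_neg (by simp)]
          simp only [hpri]
          rw [List.any_append, h, Bool.false_or]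
    simp only [hkey]
    rw [foldl_partition_pair pri (pvDedupLower queries) [] []]
    rw [sorted_bool_partition pri (pvDedupLower queries)]
    simp
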